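-- pv_equiv track=rewrite | github.com/istvankleijn/adventofcode22 | src/10-cathode-ray_tube.py | calculate_strengths
-- ===== SOURCE A (Python) =====
-- def calculate_strengths(xs, observation_times):
--     strengths = []
--     for observation_time in observation_times:
--         for i, (t_next, _) in enumerate(xs):
--             _, x_prev = xs[i - 1]
--             if t_next >= observation_time:
--                 break
--         strengths.append(observation_time * x_prev)
--     return strengths
-- ===== SOURCE B (Python) =====
-- def calculate_strengths(xs, observation_times):
--     n = len(xs)
--     order = sorted(range(len(observation_times)), key=lambda k: observation_times[k])
--     strengths = [0] * len(observation_times)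
--     j = 0
--     for k in order:
--         t = observation_times[k]
--         while j < n - 1 and xs[j][0] < t:
--             j += 1
--         strengths[k] = t * xs[j - 1][1]
--     return strengths
-- ===== Notes on version B (the rewrite author's own statement) =====
-- stated objective: alternative
-- what changed: B sorts the observation indices by time once and answers all queries with a single monotone pointer sweep through xs, instead of A's fresh linear scan of xs for every observation time.
-- outside the precondition, e.g. on calculate_strengths([], [1]): A raises NameError, B raises IndexError
import Mathlib
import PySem

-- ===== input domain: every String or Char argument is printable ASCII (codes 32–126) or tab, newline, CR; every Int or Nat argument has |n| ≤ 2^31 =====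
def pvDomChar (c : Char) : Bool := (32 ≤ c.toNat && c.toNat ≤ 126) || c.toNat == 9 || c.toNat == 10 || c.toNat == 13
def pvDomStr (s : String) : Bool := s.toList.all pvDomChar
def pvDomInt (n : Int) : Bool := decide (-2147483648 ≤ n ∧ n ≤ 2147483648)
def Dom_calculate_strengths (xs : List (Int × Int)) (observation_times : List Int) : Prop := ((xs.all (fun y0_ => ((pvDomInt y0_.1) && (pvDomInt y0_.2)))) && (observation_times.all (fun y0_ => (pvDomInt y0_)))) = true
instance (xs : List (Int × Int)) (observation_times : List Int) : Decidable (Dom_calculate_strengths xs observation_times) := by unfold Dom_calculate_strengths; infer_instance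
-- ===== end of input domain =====

-- B replaces A's fresh linear scan of xs per observation by one sort of the observation indices
-- plus a single monotone pointer sweep through xs; return values agree on all of Pre_.

-- ===== PORT A =====
-- inner 'for i, (t_next, _) in enumerate(xs): _, x_prev = xs[i-1]; if t_next >= observation_time: break'
-- i is the running enumerate index; xp is the current value of x_prev (none = not yet assigned).
def pvAScan (xs : List (Int × Int)) (t : Int) (i : Nat) : List (Int × Int) → Option Int → Option Int
  | [], xp => xp
  | (t_next, _) :: rest, _ =>
      let xp' := (PySem.List.pyGet? xs ((i : Int) - 1)).map Prod.snd   -- _, x_prev = xs[i - 1]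
      if t_next ≥ t then xp' else pvAScan xs t (i + 1) rest xp'

-- outer loop over observation_times, threading x_prev and building strengths;
-- '.getD 0' is only reached where Python raises NameError (xs = [] with observations), outside Pre_.
def pvAOuter (xs : List (Int × Int)) : List Int → Option Int → List Int
  | [], _ => []
  | t :: rest, xp =>
      let xp' := pvAScan xs t 0 xs xp
      (t * xp'.getD 0) :: pvAOuter xs rest xp'

def calculate_strengths (xs : List (Int × Int)) (observation_times : List Int) : List Int :=
  pvAOuter xs observation_times none

-- ===== PORT B =====
-- 'while j < n - 1 and xs[j][0] < t: j += 1'  (xs[j] is in range whenever the test reads it)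
def pvBWhile (xs : List (Int × Int)) (t : Int) (j : Nat) : Nat :=
  if j < xs.length - 1 ∧ (xs.getD j (0, 0)).1 < t then pvBWhile xs t (j + 1) else j
termination_by xs.length - 1 - j
decreasing_by omega

-- 'for k in order: …' threading the pointer j and the result list strengths (List.set = item assignment);
-- 'observation_times[k]' with k drawn from range(len(observation_times)) is in range, hence getD.
def pvBLoop (xs : List (Int × Int)) (obs : List Int) : List Nat → List Int → Nat → List Int
  | [], strengths, _ => strengths
  | k :: ks, strengths, j =>
      let t := obs.getD k 0
      let j' := pvBWhile xs t j
      pvBLoop xs obs ks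
        (strengths.set k (t * ((PySem.List.pyGet? xs ((j' : Int) - 1)).map Prod.snd).getD 0)) j'

def calculate_strengths_alt (xs : List (Int × Int)) (observation_times : List Int) : List Int :=
  let order := PySem.List.sorted (List.range observation_times.length)
    (fun k => observation_times.getD k 0) false
  pvBLoop xs observation_times order (List.replicate observation_times.length 0) 0

-- ===== PRECONDITION & SPEC =====
-- Pre_ excludes only the inputs where the Python A raises (NameError: x_prev unassigned):
-- empty xs together with a nonempty observation list (B raises IndexError there too).
def Pre_calculate_strengths (xs : List (Int × Int)) (observation_times : List Int) : Prop :=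
  observation_times = [] ∨ xs ≠ []
instance (xs : List (Int × Int)) (observation_times : List Int) : Decidable (Pre_calculate_strengths xs observation_times) := by unfold Pre_calculate_strengths; infer_instance

def pvWitness_calculate_strengths : (List (Int × Int)) × List Int := ([(1, 1), (3, 5)], [2, 4])

def Spec_calculate_strengths (xs : List (Int × Int)) (observation_times : List Int) (out : List Int) : Prop := out = calculate_strengths_alt xs observation_times
instance (xs : List (Int × Int)) (observation_times : List Int) (out : List Int) : Decidable (Spec_calculate_strengths xs observation_times out) := by unfold Spec_calculate_strengths; infer_instance

-- ===== CLAIM (what is proved, stated in full; the proofs are below) =====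
def Claim_equal_calculate_strengths : Prop := ∀ (xs : List (Int × Int)) (observation_times : List Int), Dom_calculate_strengths xs observation_times → Pre_calculate_strengths xs observation_times → Spec_calculate_strengths xs observation_times (calculate_strengths xs observation_times)

-- ===== LEMMAS AND PROOFS =====

-- the common value both programs compute for one observation time t:
-- pvFirstGE xs t = index of the first element of xs whose time is ≥ t, capped at xs.length - 1
def pvFirstGE : List (Int × Int) → Int → Nat
  | [], _ => 0
  | [_], _ => 0
  | p :: q :: rest, t => if p.1 ≥ t then 0 else pvFirstGE (q :: rest) t + 1

def pvVal (xs : List (Int × Int)) (t : Int) : Int :=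
  t * ((PySem.List.pyGet? xs ((pvFirstGE xs t : Int) - 1)).map Prod.snd).getD 0

theorem pvAScan_eq (xs : List (Int × Int)) (t : Int) :
    ∀ (rest : List (Int × Int)) (i : Nat) (xp : Option Int), rest ≠ [] →
      pvAScan xs t i rest xp =
        (PySem.List.pyGet? xs (((i + pvFirstGE rest t : Nat) : Int) - 1)).map Prod.snd := by
  intro rest
  induction rest with
  | nil => intro _ _ h; exact absurd rfl h
  | cons p rest ih =>
    intro i xp _
    cases rest with
    | nil =>
      cases p with
      | mk tn x =>
        simp only [pvAScan, pvFirstGE]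
        split <;> simp
    | cons q rest' =>
      obtain ⟨tn, x⟩ := p
      by_cases h : tn ≥ t
      · simp [pvAScan, pvFirstGE, h]
      · rw [pvAScan]
        simp only [ge_iff_le] at h ⊢
        rw [if_neg h, ih (i + 1) _ (by simp)]
        have : pvFirstGE ((tn, x) :: q :: rest') t = pvFirstGE (q :: rest') t + 1 := by
          simp [pvFirstGE, h]
        rw [this]
        congr 2
        push_cast
        ring

theorem calculate_strengths_eq_map (xs : List (Int × Int)) (obs : List Int) (hxs : xs ≠ []) :
    calculate_strengths xs obs = obs.map (pvVal xs) := by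
  unfold calculate_strengths
  generalize (none : Option Int) = xp
  induction obs generalizing xp with
  | nil => rfl
  | cons t rest ih =>
    simp only [pvAOuter, List.map]
    rw [pvAScan_eq xs t xs 0 xp hxs]
    simp only [List.cons.injEq]
    exact ⟨by simp [pvVal], ih _⟩

-- B-side: the while loop computes pvFirstGE, given that everything before j is < t
theorem pvFirstGE_le (xs : List (Int × Int)) (t : Int) : pvFirstGE xs t ≤ xs.length - 1 := by
  induction xs with
  | nil => simp [pvFirstGE]
  | cons p rest ih =>
    cases rest with
    | nil => simp [pvFirstGE]
    | cons q rest' =>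
      simp only [pvFirstGE]
      split
      · simp
      · simp only [List.length_cons] at *
        omega

theorem pvFirstGE_lt_before (xs : List (Int × Int)) (t : Int) :
    ∀ i < pvFirstGE xs t, (xs.getD i (0, 0)).1 < t := by
  induction xs with
  | nil => simp [pvFirstGE]
  | cons p rest ih =>
    cases rest with
    | nil => simp [pvFirstGE]
    | cons q rest' =>
      simp only [pvFirstGE]
      split
      · omega
      · next h =>
        intro i hi
        cases i with
        | zero => simpa using lt_of_not_ge h
        | succ i' =>
          simp only [List.getD_cons_succ]
          exact ih i' (by omega)

theorem pvFirstGE_stop (xs : List (Int × Int)) (t : Int) (hxs : xs ≠ []) :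
    pvFirstGE xs t = xs.length - 1 ∨ (xs.getD (pvFirstGE xs t) (0, 0)).1 ≥ t := by
  induction xs with
  | nil => exact absurd rfl hxs
  | cons p rest ih =>
    cases rest with
    | nil => left; simp [pvFirstGE]
    | cons q rest' =>
      simp only [pvFirstGE]
      split
      · next h => right; simpa using h
      · rcases ih (by simp) with h | h
        · left; simp only [List.length_cons] at *; omega
        · right; simpa using h

theorem pvBWhile_eq (xs : List (Int × Int)) (t : Int) (hxs : xs ≠ []) :
    ∀ j, j ≤ pvFirstGE xs t → (∀ i < j, (xs.getD i (0, 0)).1 < t) →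
      pvBWhile xs t j = pvFirstGE xs t := by
  intro j
  induction j using (pvBWhile.induct xs t) with
  | case1 j hcond ih =>
    intro hle hpre0
    rw [pvBWhile, if_pos hcond]
    rcases Nat.lt_or_ge j (pvFirstGE xs t) with hlt | hge
    · exact ih (by omega) (fun i hi => by
        rcases Nat.lt_or_ge i j with h | h
        · exact hpre0 i h
        · have : i = j := by omega
          subst this; exact hcond.2)
    · -- j = pvFirstGE: the loop condition cannot hold
      have hj : j = pvFirstGE xs t := by omega
      subst hj
      rcases pvFirstGE_stop xs t hxs with h | h
      · omega
      · exact absurd hcond.2 (by omega)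
  | case2 j hcond =>
    intro hle hpre
    rw [pvBWhile, if_neg hcond]
    rcases Nat.lt_or_ge j (pvFirstGE xs t) with hlt | hge
    · exfalso
      have h1 := pvFirstGE_lt_before xs t j hlt
      have h2 := pvFirstGE_le xs t
      exact hcond ⟨by omega, h1⟩
    · omega

-- foldl-set picture of pvBLoop, with the pointer invariant
theorem pvBLoop_eq_foldl (xs : List (Int × Int)) (obs : List Int) (hxs : xs ≠ []) :
    ∀ (ks : List Nat) (res : List Int) (j : Nat),
      List.Pairwise (fun a b => obs.getD a 0 ≤ obs.getD b 0) ks →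
      (∀ k ∈ ks, ∀ i < j, (xs.getD i (0, 0)).1 < obs.getD k 0) →
      j ≤ xs.length - 1 →
      pvBLoop xs obs ks res j =
        ks.foldl (fun r k => r.set k (pvVal xs (obs.getD k 0))) res := by
  intro ks
  induction ks with
  | nil => intro _ _ _ _ _; rfl
  | cons k ks ih =>
    intro res j hpair hpre hj
    simp only [pvBLoop, List.foldl_cons]
    have hfst : pvBWhile xs (obs.getD k 0) j = pvFirstGE xs (obs.getD k 0) := by
      apply pvBWhile_eq xs _ hxs j _ (hpre k (by simp))
      by_contra hgt
      have := pvFirstGE_le xs (obs.getD k 0)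
      have := hpre k (by simp) (pvFirstGE xs (obs.getD k 0)) (by omega)
      rcases pvFirstGE_stop xs (obs.getD k 0) hxs with h | h <;> omega
    rw [hfst]
    rw [ih _ (pvFirstGE xs (obs.getD k 0)) (List.Pairwise.sublist (by simp) hpair)
        (fun k' hk' i hi => lt_of_lt_of_le (pvFirstGE_lt_before xs _ i hi)
          (List.rel_of_pairwise_cons hpair hk'))
        (pvFirstGE_le xs _)]
    rfl

theorem foldl_set_getD (v : Nat → Int) :
    ∀ (ks : List Nat) (res : List Int) (i : Nat), i < res.length →
      ((ks.foldl (fun r k => r.set k (v k)) res).getD i 0) =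
        if i ∈ ks then v i else res.getD i 0 := by
  intro ks
  induction ks with
  | nil => simp
  | cons k ks ih =>
    intro res i hi
    simp only [List.foldl_cons, List.mem_cons]
    rw [ih _ i (by simpa using hi)]
    by_cases hmem : i ∈ ks
    · simp [hmem]
    · by_cases hik : i = k
      · subst hik; simp [hmem, List.getD, hi]
      · simp only [hmem, hik, if_false, List.getD_eq_getElem?_getD]
        rw [List.getElem?_set]
        simp [Ne.symm hik]

theorem foldl_set_length (v : Nat → Int) :
    ∀ (ks : List Nat) (res : List Int),
      (ks.foldl (fun r k => r.set k (v k)) res).length = res.length := by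
  intro ks
  induction ks with
  | nil => simp
  | cons k ks ih => intro res; simp [ih]

theorem calculate_strengths_alt_eq_map (xs : List (Int × Int)) (obs : List Int) (hxs : xs ≠ []) :
    calculate_strengths_alt xs obs = obs.map (pvVal xs) := by
  unfold calculate_strengths_alt
  set key : Nat → Int := fun k => obs.getD k 0 with hkey
  set order := PySem.List.sorted (List.range obs.length) key false with horder
  have hperm : order.Perm (List.range obs.length) := PySem.List.sorted_perm _ _ _
  have hpair : order.Pairwise (fun a b => key a ≤ key b) := PySem.List.sorted_pairwise _ _
  rw [pvBLoop_eq_foldl xs obs hxs order _ 0 hpair (by omega) (by omega)]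
  apply List.ext_getElem
  · rw [foldl_set_length, List.length_replicate, List.length_map]
  · intro i h1 h2
    have hlen : i < obs.length := by simpa using h2
    have hres : i < (List.replicate obs.length (0:Int)).length := by simpa using hlen
    have := foldl_set_getD (fun k => pvVal xs (key k)) order (List.replicate obs.length 0) i hres
    have hmem : i ∈ order := (hperm.mem_iff).2 (by simpa using hlen)
    rw [if_pos hmem] at this
    have hgetD : ((order.foldl (fun r k => r.set k (pvVal xs (key k)))
        (List.replicate obs.length 0)).getD i 0) =
        (order.foldl (fun r k => r.set k (pvVal xs (key k)))
          (List.replicate obs.length 0))[i] := by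
      rw [List.getD_eq_getElem?_getD, List.getElem?_eq_getElem h1]
      rfl
    rw [hgetD] at this
    rw [this]
    simp [hkey, pvVal, List.getD_eq_getElem?_getD, List.getElem?_eq_getElem hlen]

-- ===== VERDICT (by name: the statement is the Claim_ definition above) =====
theorem calculate_strengths_spec : Claim_equal_calculate_strengths := by
  intro xs obs _ hpre
  unfold Spec_calculate_strengths
  rcases hpre with h | h
  · subst h; rfl
  · rw [calculate_strengths_eq_map xs obs h, calculate_strengths_alt_eq_map xs obs h]
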